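-- pv_equiv track=rewrite | github.com/yoongon/coding-interview | validate-python-indent.py | compress_nests
-- ===== SOURCE A (Python) =====
-- def compress_nests(s):
--     det = {'}': '{', ']': '[', ')': '('}
--     res, stack = '', []
--
--     for c in s:
--         if c in '{[(':
--             stack.append(c)
--         elif c in det:
--             if stack and det[c] == stack[-1]:
--                 stack.pop()
--             else:
--                 return False, None
--
--         if stack and c == '\n':
--             continue
--         res += c
--     return not stack, res
-- ===== SOURCE B (Python) =====
-- def compress_nests(s):
--     # pass 1: validate bracket matching with a stack
--     pair = {')': '(', ']': '[', '}': '{'}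
--     stack = []
--     for c in s:
--         if c in '([{':
--             stack.append(c)
--         elif c in pair:
--             if not stack or stack[-1] != pair[c]:
--                 return False, None
--             stack.pop()
--     balanced = not stack
--     # pass 2: rebuild with a depth counter, dropping newlines inside nests
--     out = []
--     depth = 0
--     for c in s:
--         if c in '([{':
--             depth += 1
--         elif c in ')]}':
--             depth -= 1
--         if not (depth > 0 and c == '\n'):
--             out.append(c)
--     return balanced, ''.join(out)
-- ===== Notes on version B (the rewrite author's own statement) =====
-- stated objective: alternative
-- what changed: Replaced A's single interleaved loop (stack + string accumulator with early return) by two independent passes: a stack-only validation pass, then a rebuild pass using just an integer depth counter to drop newlines inside nests.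
import Mathlib
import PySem

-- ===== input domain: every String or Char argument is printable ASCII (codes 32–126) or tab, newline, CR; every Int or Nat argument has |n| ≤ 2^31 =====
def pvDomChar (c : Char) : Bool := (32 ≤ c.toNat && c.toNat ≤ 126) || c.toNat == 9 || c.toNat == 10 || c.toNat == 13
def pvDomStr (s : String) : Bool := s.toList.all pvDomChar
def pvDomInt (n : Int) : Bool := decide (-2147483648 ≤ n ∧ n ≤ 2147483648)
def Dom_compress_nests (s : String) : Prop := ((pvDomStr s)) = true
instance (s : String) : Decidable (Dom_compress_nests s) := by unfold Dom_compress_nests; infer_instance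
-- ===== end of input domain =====

-- ===== PORT A =====
-- B re-implements A as two independent passes (validate, then rebuild); same return value everywhere.
-- det lookup of A's dict for closing brackets
def cnDet (c : Char) : Option Char :=
  if c = '}' then some '{' else if c = ']' then some '[' else if c = ')' then some '(' else none

-- A's single loop: state = (res so far, stack), early return (False, None) on mismatch
def cnLoopA : List Char → List Char → List Char → Bool × Option String
  | [], res, stack => (stack.isEmpty, some (String.mk res))
  | c :: cs, res, stack =>
    if c = '{' ∨ c = '[' ∨ c = '(' then
      cnLoopA cs (res ++ [c]) (c :: stack)
    else
      match cnDet c with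
      | some o =>
        match stack with
        | t :: rest => if o = t then cnLoopA cs (res ++ [c]) rest else (false, none)
        | [] => (false, none)
      | none =>
        if ¬ stack.isEmpty ∧ c = '\n' then cnLoopA cs res stack
        else cnLoopA cs (res ++ [c]) stack

def compress_nests (s : String) : Bool × Option String := cnLoopA s.toList [] []

-- ===== PORT B =====
def cnPair (c : Char) : Char := if c = ')' then '(' else if c = ']' then '[' else '{'

-- pass 1: stack-only validation; none = mismatch, some st = leftover opens
def cnValidate : List Char → List Char → Option (List Char)
  | [], stack => some stack
  | c :: cs, stack =>
    if c = '(' ∨ c = '[' ∨ c = '{' then cnValidate cs (c :: stack)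
    else if c = ')' ∨ c = ']' ∨ c = '}' then
      match stack with
      | [] => none
      | t :: rest => if t ≠ cnPair c then none else cnValidate cs rest
    else cnValidate cs stack

-- pass 2: rebuild with an integer depth counter, dropping newlines while depth > 0
def cnRebuild : List Char → Int → List Char
  | [], _ => []
  | c :: cs, depth =>
    let d : Int :=
      if c = '(' ∨ c = '[' ∨ c = '{' then depth + 1
      else if c = ')' ∨ c = ']' ∨ c = '}' then depth - 1
      else depth
    if d > 0 ∧ c = '\n' then cnRebuild cs d else c :: cnRebuild cs d

def compress_nests_alt (s : String) : Bool × Option String :=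
  match cnValidate s.toList [] with
  | none => (false, none)
  | some st => (st.isEmpty, some (String.mk (cnRebuild s.toList 0)))
-- ===== PRECONDITION & SPEC =====
def Spec_compress_nests (s : String) (out : Bool × Option String) : Prop := out = compress_nests_alt s
instance (s : String) (out : Bool × Option String) : Decidable (Spec_compress_nests s out) := by unfold Spec_compress_nests; infer_instance

-- ===== CLAIM (what is proved, stated in full; the proofs are below) =====
def Claim_equal_compress_nests : Prop := ∀ (s : String), Dom_compress_nests s → Spec_compress_nests s (compress_nests s)

-- ===== LEMMAS AND PROOFS =====

-- ===== VERDICT (by name: the statement is the Claim_ definition above) =====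
-- key invariant: A's interleaved loop equals validate + rebuild from the same stack,
-- where the rebuild's depth is the stack's length
theorem cnKey : ∀ (cs stack res : List Char),
    cnLoopA cs res stack =
      match cnValidate cs stack with
      | none => (false, none)
      | some st => (st.isEmpty, some (String.mk (res ++ cnRebuild cs (stack.length : Int)))) := by
  intro cs
  induction cs with
  | nil => intro stack res; simp [cnLoopA, cnValidate, cnRebuild]
  | cons c cs ih =>
    intro stack res
    by_cases h1 : c = '{' ∨ c = '[' ∨ c = '('
    · have h1' : c = '(' ∨ c = '[' ∨ c = '{' := by tauto
      have hc : c ≠ '\n' := by rcases h1 with rfl|rfl|rfl <;> decide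
      simp only [cnLoopA, cnValidate, cnRebuild, if_pos h1, if_pos h1']
      rw [ih]
      cases cnValidate cs (c :: stack) with
      | none => rfl
      | some st =>
        simp [hc, List.append_assoc, List.length_cons]
    · by_cases h2 : c = '}' ∨ c = ']' ∨ c = ')'
      · have h2' : c = ')' ∨ c = ']' ∨ c = '}' := by tauto
        have hc : c ≠ '\n' := by rcases h2 with rfl|rfl|rfl <;> decide
        have hdet : cnDet c = some (cnPair c) := by
          rcases h2 with rfl|rfl|rfl <;> rfl
        simp only [cnLoopA, cnValidate, cnRebuild, if_neg h1, if_neg (by tauto : ¬(c = '(' ∨ c = '[' ∨ c = '{')), if_pos h2', hdet]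
        cases stack with
        | nil => rfl
        | cons t rest =>
          by_cases ht : cnPair c = t
          · simp only [if_pos ht, if_neg (by simp [ht.symm] : ¬(t ≠ cnPair c))]
            rw [ih]
            cases cnValidate cs rest with
            | none => rfl
            | some st =>
              simp [hc, List.append_assoc, List.length_cons]
          · simp only [if_neg ht, if_pos (by simp [Ne.symm ht] : (t ≠ cnPair c))]
      · have hdet : cnDet c = none := by
          push_neg at h2
          simp [cnDet, h2.1, h2.2.1, h2.2.2]
        simp only [cnLoopA, cnValidate, cnRebuild, if_neg h1,
          if_neg (by tauto : ¬(c = '(' ∨ c = '[' ∨ c = '{')),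
          if_neg (by tauto : ¬(c = ')' ∨ c = ']' ∨ c = '}')), hdet]
        have hlen : ((stack.length : Int) > 0 ∧ c = '\n') ↔ (¬ stack.isEmpty ∧ c = '\n') := by
          cases stack <;> simp
        by_cases hn : ¬ stack.isEmpty ∧ c = '\n'
        · simp only [if_pos hn, if_pos (hlen.mpr hn)]
          rw [ih]
        · simp only [if_neg hn, if_neg (fun h => hn (hlen.mp h))]
          rw [ih]
          cases cnValidate cs stack with
          | none => rfl
          | some st => simp [List.append_assoc]

theorem compress_nests_spec : Claim_equal_compress_nests := by
  intro s _
  unfold Spec_compress_nests compress_nests compress_nests_alt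
  rw [cnKey]
  cases cnValidate s.toList [] <;> simp
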